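-- pv_equiv track=rewrite | github.com/schnappischnap/advent_of_code_2018 | day_02_inventory_management_system.py | part_1
-- ===== SOURCE A (Python) =====
-- from collections import Counter
--
-- def part_1(data):
--     doubles, triples = 0, 0
--     for line in data:
--         counter = Counter(line)
--         if 2 in counter.values():
--             doubles += 1
--         if 3 in counter.values():
--             triples += 1
--     return doubles * triples
-- ===== SOURCE B (Python) =====
-- def _run_lengths(chars):
--     lengths = []
--     i = 0
--     n = len(chars)
--     while i < n:
--         j = i + 1
--         while j < n and chars[j] == chars[i]:
--             j += 1
--         lengths.append(j - i)
--         i = j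
--     return lengths
--
--
-- def part_1(data):
--     doubles, triples = 0, 0
--     for line in data:
--         lengths = _run_lengths(sorted(line))
--         if 2 in lengths:
--             doubles += 1
--         if 3 in lengths:
--             triples += 1
--     return doubles * triples
-- ===== Notes on version B (the rewrite author's own statement) =====
-- stated objective: alternative
-- what changed: Replaces the per-line Counter hash tabulation with sorting the line's characters and a single run-length scan over the sorted list, testing whether 2 or 3 occurs among the run lengths.
import Mathlib
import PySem

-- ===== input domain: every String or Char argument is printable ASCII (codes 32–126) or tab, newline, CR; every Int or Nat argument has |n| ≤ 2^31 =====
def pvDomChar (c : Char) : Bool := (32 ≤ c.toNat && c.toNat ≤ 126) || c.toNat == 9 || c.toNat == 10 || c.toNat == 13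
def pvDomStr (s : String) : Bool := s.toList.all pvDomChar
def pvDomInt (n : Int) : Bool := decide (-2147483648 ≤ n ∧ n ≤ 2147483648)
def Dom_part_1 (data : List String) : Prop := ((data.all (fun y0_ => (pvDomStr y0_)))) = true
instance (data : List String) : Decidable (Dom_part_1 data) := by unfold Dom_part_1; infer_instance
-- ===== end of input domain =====

-- B replaces A's per-line Counter tabulation by sorting the line's characters and a
-- run-length scan over the sorted list (objective: alternative; same result, no speed claim).

-- ===== PORT A =====
def part_1 (data : List String) : Int :=
  let p := data.foldl (fun (acc : Int × Int) (line : String) =>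
    let counter := PySem.Dict.counter line.toList
    let acc1 := if (2 : Int) ∈ counter.values then (acc.1 + 1, acc.2) else acc
    if (3 : Int) ∈ counter.values then (acc1.1, acc1.2 + 1) else acc1) (0, 0)
  p.1 * p.2

-- ===== PORT B =====
-- run-length scan: the outer while of Source B's _run_lengths; the inner while that
-- advances j over equal characters is the takeWhile/dropWhile split of the tail.
def runLengths (chars : List Char) : List Nat :=
  match chars with
  | [] => []
  | x :: xs =>
    ((xs.takeWhile (· == x)).length + 1) :: runLengths (xs.dropWhile (· == x))
termination_by chars.length
decreasing_by
  have := List.length_dropWhile_le (p := (· == x)) (l := xs)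
  simp; omega

def part_1_alt (data : List String) : Int :=
  let p := data.foldl (fun (acc : Int × Int) (line : String) =>
    let lengths := runLengths (PySem.List.sorted line.toList (fun c => c) false)
    let acc1 := if 2 ∈ lengths then (acc.1 + 1, acc.2) else acc
    if 3 ∈ lengths then (acc1.1, acc1.2 + 1) else acc1) (0, 0)
  p.1 * p.2

-- ===== PRECONDITION & SPEC =====
def Spec_part_1 (data : List String) (out : Int) : Prop := out = part_1_alt data
instance (data : List String) (out : Int) : Decidable (Spec_part_1 data out) := by unfold Spec_part_1; infer_instance

-- ===== CLAIM (what is proved, stated in full; the proofs are below) =====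
def Claim_equal_part_1 : Prop := ∀ (data : List String), Dom_part_1 data → Spec_part_1 data (part_1 data)

-- ===== LEMMAS AND PROOFS =====

-- On a ≤-sorted list, the run lengths are exactly the multiplicities of its elements.
lemma mem_runLengths_sorted :
    ∀ (n : Nat) (l : List Char), l.length ≤ n → l.Pairwise (· ≤ ·) →
      ∀ k, (k ∈ runLengths l ↔ ∃ c, c ∈ l ∧ l.count c = k) := by
  intro n
  induction n with
  | zero =>
    intro l hl _ k
    have : l = [] := List.length_eq_zero_iff.mp (Nat.le_zero.mp hl)
    subst this
    simp [runLengths]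
  | succ m ih =>
    intro l hl hs k
    match l with
    | [] => simp [runLengths]
    | x :: xs =>
      have hx : ∀ b ∈ xs, x ≤ b := (List.pairwise_cons.mp hs).1
      have hxs : xs.Pairwise (· ≤ ·) := (List.pairwise_cons.mp hs).2
      obtain ⟨r, d, hr, hd⟩ :
          ∃ r d, r = xs.takeWhile (· == x) ∧ d = xs.dropWhile (· == x) := ⟨_, _, rfl, rfl⟩
      have hsplit : r ++ d = xs := by rw [hr, hd]; exact List.takeWhile_append_dropWhile
      have hrx : ∀ c ∈ r, c = x := by
        intro c hc
        rw [hr] at hc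
        have := List.mem_takeWhile_imp hc
        simpa using this
      have hdsub : d.Sublist xs := by rw [hd]; exact List.dropWhile_sublist _
      have hdp : d.Pairwise (· ≤ ·) := hxs.sublist hdsub
      have hxd : x ∉ d := by
        intro hmem
        match hdm : d, hmem with
        | h :: t, hmem =>
          have hh : (h == x) = false := by
            have h0 := List.head?_dropWhile_not (p := (· == x)) (l := xs)
            rw [← hd] at h0
            simpa using h0
          have hhx : h ≠ x := by simpa using hh
          have hhmem : h ∈ xs := hdsub.mem List.mem_cons_self
          have hxh : x < h := lt_of_le_of_ne (hx h hhmem) (Ne.symm hhx)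
          rcases List.mem_cons.mp hmem with h1 | h1
          · exact hhx h1.symm
          · have : h ≤ x := (List.pairwise_cons.mp hdp).1 x h1
            exact absurd (lt_of_lt_of_le hxh this) (lt_irrefl x)
      have hcr : r.count x = r.length := by
        rw [List.count_eq_length]
        intro c hc; exact ((hrx c hc) ▸ rfl)
      have hcountx : (x :: xs).count x = r.length + 1 := by
        rw [← hsplit]
        simp [List.count_append, hcr, List.count_eq_zero.mpr hxd]
      have hcount_ne : ∀ c, c ≠ x → (x :: xs).count c = d.count c := by
        intro c hc
        rw [← hsplit]
        have h0 : r.count c = 0 := List.count_eq_zero.mpr (fun hmem => hc (hrx c hmem))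
        simp [List.count_cons, List.count_append, h0]
        exact fun h => absurd h.symm hc
      have hdlen : d.length ≤ m := by
        have h1 : d.length ≤ xs.length := by rw [hd]; exact List.length_dropWhile_le _ _
        have : xs.length + 1 ≤ m + 1 := by simpa using hl
        omega
      have IH := ih d hdlen hdp
      rw [runLengths]
      simp only [List.mem_cons, ← hr, ← hd]
      rw [IH k]
      constructor
      · rintro (hk | ⟨c, hcd, hcc⟩)
        · refine ⟨x, Or.inl rfl, ?_⟩
          rw [hcountx, ← hk]
        · have hcnx : c ≠ x := fun h => hxd (h ▸ hcd)
          refine ⟨c, Or.inr ?_, by rw [hcount_ne c hcnx]; exact hcc⟩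
          rw [← hsplit]
          exact List.mem_append.mpr (Or.inr hcd)
      · rintro ⟨c, hcmem, hcc⟩
        by_cases hc : c = x
        · left; rw [hc, hcountx] at hcc; omega
        · right
          refine ⟨c, ?_, by rw [← hcount_ne c hc]; exact hcc⟩
          rcases hcmem with h1 | h1
          · exact absurd h1 hc
          · rw [← hsplit] at h1
            rcases List.mem_append.mp h1 with h2 | h2
            · exact absurd (hrx c h2) hc
            · exact h2

-- A's membership test on Counter values equals B's test on the sorted run lengths.
lemma cond_iff (l : List Char) (k : Nat) :
    ((k : Int) ∈ (PySem.Dict.counter l).values) ↔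
      k ∈ runLengths (PySem.List.sorted l (fun c => c) false) := by
  set s := PySem.List.sorted l (fun c => c) false with hsdef
  have hperm : s.Perm l := by rw [hsdef]; exact PySem.List.sorted_perm _ _ _
  have hs : s.Pairwise (· ≤ ·) := by
    have := PySem.List.sorted_pairwise (xs := l) (key := fun c : Char => c)
    simpa [← hsdef] using this
  have hvals : (PySem.Dict.counter l).values =
      (PySem.Set.ofList l).map (fun c => (l.count c : Int)) := by
    show ((PySem.Dict.counter l).items).map (·.2) = _
    rw [PySem.Dict.items_counter]
    simp
  rw [hvals]
  rw [mem_runLengths_sorted s.length s le_rfl hs k]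
  simp only [List.mem_map]
  constructor
  · rintro ⟨c, hc, hcc⟩
    have hck : l.count c = k := by exact_mod_cast hcc
    exact ⟨c, hperm.mem_iff.mpr ((PySem.Set.mem_ofList _ _).mp hc),
      by rw [hperm.count_eq]; exact hck⟩
  · rintro ⟨c, hc, hcc⟩
    rw [hperm.count_eq] at hcc
    exact ⟨c, (PySem.Set.mem_ofList _ _).mpr (hperm.mem_iff.mp hc), by exact_mod_cast hcc⟩

-- ===== VERDICT (by name: the statement is the Claim_ definition above) =====
theorem part_1_spec : Claim_equal_part_1 := by
  intro data _
  show part_1 data = part_1_alt data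
  unfold part_1 part_1_alt
  have hfold :
      data.foldl (fun (acc : Int × Int) (line : String) =>
        let counter := PySem.Dict.counter line.toList
        let acc1 := if (2 : Int) ∈ counter.values then (acc.1 + 1, acc.2) else acc
        if (3 : Int) ∈ counter.values then (acc1.1, acc1.2 + 1) else acc1) (0, 0) =
      data.foldl (fun (acc : Int × Int) (line : String) =>
        let lengths := runLengths (PySem.List.sorted line.toList (fun c => c) false)
        let acc1 := if 2 ∈ lengths then (acc.1 + 1, acc.2) else acc
        if 3 ∈ lengths then (acc1.1, acc1.2 + 1) else acc1) (0, 0) := by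
    apply List.foldl_ext
    intro acc line _
    have h2 := cond_iff line.toList 2
    have h3 := cond_iff line.toList 3
    norm_num at h2 h3
    simp only [h2, h3]
  simp only [hfold]
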